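-- pv_equiv track=rewrite | github.com/seb2b/project_tic_tac_toe_ia | main.py | win_diag
-- ===== SOURCE A (Python) =====
-- def win_diag(board, player, nb_win_case):
--     for x, row in enumerate(board):
--         if x + nb_win_case > len(board):
--             break
--         for y, col in enumerate(row):
--             # Cherche dans y meme si y + nb_win_case > len(board) car il cherche dans diagonal gauche et droite en un seul for
--             if col == player:
--                 isDiagL = 0
--                 isDiagR = 0
--                 for i in range(0, nb_win_case):
--                     if y + i < len(board) and board[x+i][y+i] == player:
--                         isDiagL += 1
--                     if y >= i and board[x+i][y-i] == player:
--                         isDiagR += 1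
--                 if isDiagL == nb_win_case or isDiagR == nb_win_case:
--                     return True
-- ===== SOURCE B (Python) =====
-- def win_diag(board, player, nb_win_case):
--     # DP: per row, track lengths of diagonal player-streaks ending at each cell.
--     prev_dl = []  # streak along down-right direction (from up-left), previous row
--     prev_dr = []  # streak along down-left direction (from up-right), previous row
--     for row in board:
--         dl = []
--         dr = []
--         for y, col in enumerate(row):
--             if col == player:
--                 l = 1 + (prev_dl[y - 1] if 1 <= y <= len(prev_dl) else 0)
--                 r = 1 + (prev_dr[y + 1] if y + 1 < len(prev_dr) else 0)
--                 if l >= nb_win_case or r >= nb_win_case: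
--                     return True
--                 dl.append(l)
--                 dr.append(r)
--             else:
--                 dl.append(0)
--                 dr.append(0)
--         prev_dl, prev_dr = dl, dr
-- ===== Notes on version B (the rewrite author's own statement) =====
-- stated objective: alternative
-- what changed: A re-scans a k-cell window from every player cell (O(n^2*k) worst case); B instead makes a single pass that carries, per cell, the running lengths of the two diagonal streaks ending there (O(n^2) worst case; not measurably faster on the sampled inputs, where A's early break/return dominates).
-- intended difference: For negative nb_win_case on a board containing the player, A returns None (its count==k equality can never hit a negative) while B returns True (any streak satisfies streak >= k); a run of at least a negative length vacuously exists, so B's value is the natural reading of this unspecified corner. — e.g. on win_diag([["X"]], "X", -1): A returns none, B returns some true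
-- outside the precondition, e.g. on win_diag([['X', 'X'], ['O']], 'X', 2): A raises IndexError, B returns None; on win_diag([['O', 'X'], ['O', 'O', 'X']], 'X', 2): A returns None, B returns True
import Mathlib
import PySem

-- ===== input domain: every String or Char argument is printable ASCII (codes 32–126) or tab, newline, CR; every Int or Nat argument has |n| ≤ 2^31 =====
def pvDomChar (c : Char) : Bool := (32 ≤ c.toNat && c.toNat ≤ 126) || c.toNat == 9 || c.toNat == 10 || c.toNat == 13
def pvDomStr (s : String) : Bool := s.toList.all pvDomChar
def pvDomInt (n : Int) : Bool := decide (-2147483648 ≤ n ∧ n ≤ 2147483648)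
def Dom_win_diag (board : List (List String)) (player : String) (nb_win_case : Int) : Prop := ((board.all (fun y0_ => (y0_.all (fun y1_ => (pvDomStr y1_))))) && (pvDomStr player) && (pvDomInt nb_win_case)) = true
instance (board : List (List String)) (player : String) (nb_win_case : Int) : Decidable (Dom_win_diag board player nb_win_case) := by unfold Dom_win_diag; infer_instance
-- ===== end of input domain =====

-- B replaces A's per-cell k-step window rescan by a single pass that carries the running
-- diagonal streak lengths of the previous row (objective: alternative algorithm).

-- ===== PORT A =====
-- board[a][b]; Python raises IndexError where pyGet? is none — those inputs are outside
-- Pre_win_diag, so the .getD defaults are never reached on admitted inputs.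
def pvAget (board : List (List String)) (a b : Int) : String :=
  (PySem.List.pyGet? ((PySem.List.pyGet? board a).getD []) b).getD ""

def pvAcounts (board : List (List String)) (player : String) (x y : Nat) (k : Int) : Int × Int :=
  (PySem.List.pyRange 0 k 1).foldl
    (fun (s : Int × Int) i =>
      ( if (y : Int) + i < (board.length : Int) && pvAget board ((x : Int) + i) ((y : Int) + i) == player
          then s.1 + 1 else s.1,
        if (y : Int) ≥ i && pvAget board ((x : Int) + i) ((y : Int) - i) == player
          then s.2 + 1 else s.2 ))
    (0, 0)

def pvAinner (board : List (List String)) (player : String) (k : Int) (x : Nat) :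
    Nat → List String → Bool
  | _, [] => false
  | y, col :: cols =>
    if col == player then
      let c := pvAcounts board player x y k
      if c.1 == k || c.2 == k then true else pvAinner board player k x (y + 1) cols
    else pvAinner board player k x (y + 1) cols

def pvAouter (board : List (List String)) (player : String) (k : Int) :
    Nat → List (List String) → Option Bool
  | _, [] => none
  | x, row :: rest =>
    if (x : Int) + k > (board.length : Int) then none
    else if pvAinner board player k x 0 row then some true
    else pvAouter board player k (x + 1) rest

def win_diag (board : List (List String)) (player : String) (nb_win_case : Int) : Option Bool :=
  pvAouter board player nb_win_case 0 board

-- ===== PORT B =====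
-- one row of B: builds dl/dr (streak lengths ending at each cell) from the previous row's
-- lists; returns none when the Python 'return True' fires, some (dl, dr) otherwise
def pvBrow (player : String) (k : Int) (pL pR : List Int) :
    Nat → List String → List Int → List Int → Option (List Int × List Int)
  | _, [], accL, accR => some (accL.reverse, accR.reverse)
  | y, col :: cols, accL, accR =>
    if col == player then
      let l : Int := 1 + (if 1 ≤ y ∧ y ≤ pL.length then pL.getD (y - 1) 0 else 0)
      let r : Int := 1 + (if y + 1 < pR.length then pR.getD (y + 1) 0 else 0)
      if k ≤ l ∨ k ≤ r then none
      else pvBrow player k pL pR (y + 1) cols (l :: accL) (r :: accR)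
    else pvBrow player k pL pR (y + 1) cols (0 :: accL) (0 :: accR)

def pvBouter (player : String) (k : Int) :
    List Int → List Int → List (List String) → Option Bool
  | _, _, [] => none
  | pL, pR, row :: rest =>
    match pvBrow player k pL pR 0 row [] [] with
    | none => some true
    | some (dl, dr) => pvBouter player k dl dr rest

def win_diag_alt (board : List (List String)) (player : String) (nb_win_case : Int) : Option Bool :=
  pvBouter player nb_win_case [] [] board

-- ===== PRECONDITION & SPEC =====
-- Pre_ excludes only non-square boards with 1 <= nb_win_case <= board height: there A's bounds
-- guard uses the board height instead of the row length, so it can raise IndexError or read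
-- positions its guard was not written for; all other inputs are admitted.
def Pre_win_diag (board : List (List String)) (player : String) (nb_win_case : Int) : Prop :=
  nb_win_case ≤ 0 ∨ (board.length : Int) < nb_win_case ∨ (∀ row ∈ board, row.length = board.length)

instance (board : List (List String)) (player : String) (nb_win_case : Int) :
    Decidable (Pre_win_diag board player nb_win_case) := by
  unfold Pre_win_diag; infer_instance

def pvWitness_win_diag : List (List String) × String × Int :=
  ([["X", "O"], ["O", "X"]], "X", 2)

-- For negative nb_win_case on a board containing the player, A returns None (its count==k
-- equality can never hit a negative) while B returns True (any streak satisfies streak >= k);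
-- a run of at least a negative length vacuously exists, so B's value is the natural reading
-- of this unspecified corner.
def D_win_diag (board : List (List String)) (player : String) (nb_win_case : Int) : Prop :=
  nb_win_case < 0 ∧ ∃ row ∈ board, player ∈ row

instance (board : List (List String)) (player : String) (nb_win_case : Int) :
    Decidable (D_win_diag board player nb_win_case) := by
  unfold D_win_diag; infer_instance

def Spec_win_diag (board : List (List String)) (player : String) (nb_win_case : Int) (out : Option Bool) : Prop := ¬ D_win_diag board player nb_win_case → out = win_diag_alt board player nb_win_case
instance (board : List (List String)) (player : String) (nb_win_case : Int) (out : Option Bool) : Decidable (Spec_win_diag board player nb_win_case out) := by unfold Spec_win_diag; infer_instance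

def pvDiffWitness_win_diag : List (List String) × String × Int :=
  ([["X"]], "X", -1)

def pvDiffWitnessOut_win_diag : (Option Bool) × (Option Bool) := (none, some true)

-- ===== CLAIM (what is proved, stated in full; the proofs are below) =====
def Claim_unchanged_win_diag : Prop := ∀ (board : List (List String)) (player : String) (nb_win_case : Int), Dom_win_diag board player nb_win_case → Pre_win_diag board player nb_win_case → Spec_win_diag board player nb_win_case (win_diag board player nb_win_case)
def Claim_changed_win_diag : Prop := Dom_win_diag (pvDiffWitness_win_diag.1) (pvDiffWitness_win_diag.2.1) (pvDiffWitness_win_diag.2.2) ∧ Pre_win_diag (pvDiffWitness_win_diag.1) (pvDiffWitness_win_diag.2.1) (pvDiffWitness_win_diag.2.2) ∧ D_win_diag (pvDiffWitness_win_diag.1) (pvDiffWitness_win_diag.2.1) (pvDiffWitness_win_diag.2.2) ∧ win_diag (pvDiffWitness_win_diag.1) (pvDiffWitness_win_diag.2.1) (pvDiffWitness_win_diag.2.2) = pvDiffWitnessOut_win_diag.1 ∧ win_diag_alt (pvDiffWitness_win_diag.1) (pvDiffWitness_win_diag.2.1) (pvDiffWitness_win_diag.2.2) = pvDiffWitnessOut_win_diag.2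 ∧ pvDiffWitnessOut_win_diag.1 ≠ pvDiffWitnessOut_win_diag.2
def Claim_exact_win_diag : Prop := ∀ (board : List (List String)) (player : String) (nb_win_case : Int), Dom_win_diag board player nb_win_case → Pre_win_diag board player nb_win_case → D_win_diag board player nb_win_case → win_diag board player nb_win_case ≠ win_diag_alt board player nb_win_case

-- ===== LEMMAS AND PROOFS =====

-- the cell predicate: board[x][y] is in range and equals player
def pvP (board : List (List String)) (player : String) (x y : Nat) : Bool :=
  (board[x]?.bind fun r => r[y]?) == some player

theorem pvFoldlPair (L : List Int) (f g : Int → Int → Int) (a b : Int) :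
    L.foldl (fun (s : Int × Int) i => (f s.1 i, g s.2 i)) (a, b)
      = (L.foldl f a, L.foldl g b) := by
  induction L generalizing a b with
  | nil => rfl
  | cons x xs ih => rw [List.foldl_cons, List.foldl_cons, List.foldl_cons, ih]

theorem pvFoldlCount (L : List Int) (c : Int → Bool) (a : Int) :
    L.foldl (fun t i => if c i then t + 1 else t) a = a + (L.countP c : Int) := by
  induction L generalizing a with
  | nil => simp
  | cons x xs ih =>
    rw [List.foldl_cons, List.countP_cons, ih]
    split <;> simp [Bool.not_eq_true] at * <;> push_cast <;> ring

theorem pvCountIff (k : Int) (c : Int → Bool) :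
    ((PySem.List.pyRange 0 k 1).countP c = k.toNat) ↔ ∀ i : Nat, i < k.toNat → c i := by
  have hlen : (PySem.List.pyRange 0 k 1).length = k.toNat := by
    rw [PySem.List.length_pyRange_one]; omega
  constructor
  · intro h i hi
    have hall := (List.countP_eq_length (p := c)).mp (by rw [h, hlen])
    exact hall _ (by rw [PySem.List.mem_pyRange_one]; omega)
  · intro h
    rw [← hlen, List.countP_eq_length]
    intro i hi
    rw [PySem.List.mem_pyRange_one] at hi
    have := h i.toNat (by omega)
    rwa [Int.toNat_of_nonneg hi.1] at this

theorem pvGuardL (board : List (List String)) (player : String) (x y i : Nat)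
    (hsq : ∀ row ∈ board, row.length = board.length) (hxi : x + i < board.length) :
    (((y : Int) + i < (board.length : Int)) && (pvAget board ((x : Int) + i) ((y : Int) + i) == player))
      = (decide ((y + i : Int) < (board.length : Int)) && pvP board player (x + i) (y + i)) := by
  have hcast : (x : Int) + i = ((x + i : Nat) : Int) := by push_cast; ring
  have hcast2 : (y : Int) + i = ((y + i : Nat) : Int) := by push_cast; ring
  rw [pvAget, hcast, hcast2, PySem.List.pyGet?_natCast, PySem.List.pyGet?_natCast]
  have hrow : board[x + i]? = some board[x + i] := List.getElem?_eq_getElem hxi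
  have hlen : board[x + i].length = board.length := hsq _ (List.getElem_mem hxi)
  rw [hrow]
  by_cases hy : y + i < board.length
  · have hcell : (board[x + i])[y + i]? = some (board[x + i])[y + i] :=
      List.getElem?_eq_getElem (by omega)
    rw [Option.getD_some, hcell, pvP, hrow, Option.getD_some]
    simp [hcell]
  · have hcell : (board[x + i])[y + i]? = none := by
      rw [List.getElem?_eq_none_iff]; omega
    simp [show ¬ ((y : Int) + i < (board.length : Int)) from by omega,
          show ¬ (((y + i : Nat) : Int) < (board.length : Int)) from by omega]

theorem pvGuardR (board : List (List String)) (player : String) (x y i : Nat)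
    (hsq : ∀ row ∈ board, row.length = board.length) (hxi : x + i < board.length)
    (hy : y < board.length) :
    (((y : Int) ≥ (i : Int)) && (pvAget board ((x : Int) + i) ((y : Int) - i) == player))
      = (decide (i ≤ y) && pvP board player (x + i) (y - i)) := by
  have hcast : (x : Int) + i = ((x + i : Nat) : Int) := by push_cast; ring
  have hrow : board[x + i]? = some board[x + i] := List.getElem?_eq_getElem hxi
  have hlen : board[x + i].length = board.length := hsq _ (List.getElem_mem hxi)
  by_cases hi : i ≤ y
  · have hcast2 : (y : Int) - i = ((y - i : Nat) : Int) := by omega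
    rw [pvAget, hcast, hcast2, PySem.List.pyGet?_natCast, PySem.List.pyGet?_natCast, hrow]
    have hcell : (board[x + i])[y - i]? = some (board[x + i])[y - i] :=
      List.getElem?_eq_getElem (by omega)
    rw [Option.getD_some, hcell, pvP, hrow, Option.getD_some]
    simp [hcell, hi]
  · have h1 : ¬ ((i : Int) ≤ (y : Int)) := by omega
    simp [hi, h1]

theorem pvAcounts_eq (board : List (List String)) (player : String) (x y : Nat) (k : Int) :
    pvAcounts board player x y k =
      ( ((PySem.List.pyRange 0 k 1).countP
          (fun i => (y : Int) + i < (board.length : Int) && pvAget board ((x : Int) + i) ((y : Int) + i) == player) : Int),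
        ((PySem.List.pyRange 0 k 1).countP
          (fun i => (y : Int) ≥ i && pvAget board ((x : Int) + i) ((y : Int) - i) == player) : Int) ) := by
  rw [pvAcounts,
      pvFoldlPair (PySem.List.pyRange 0 k 1)
        (fun t i => if (y : Int) + i < (board.length : Int) && pvAget board ((x : Int) + i) ((y : Int) + i) == player then t + 1 else t)
        (fun t i => if (y : Int) ≥ i && pvAget board ((x : Int) + i) ((y : Int) - i) == player then t + 1 else t) 0 0,
      pvFoldlCount, pvFoldlCount]
  simp

-- A's per-cell test, under square board, x in range for the whole window
theorem pvHitA_iff (board : List (List String)) (player : String) (x y : Nat) (k : Int)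
    (hsq : ∀ row ∈ board, row.length = board.length) (hk : 0 ≤ k)
    (hx : (x : Int) + k ≤ (board.length : Int)) (hy : y < board.length) :
    ((pvAcounts board player x y k).1 = k ∨ (pvAcounts board player x y k).2 = k) ↔
      ((∀ i, i < k.toNat → ((y + i : Int) < (board.length : Int) ∧ pvP board player (x + i) (y + i))) ∨
       (∀ i, i < k.toNat → (i ≤ y ∧ pvP board player (x + i) (y - i)))) := by
  rw [pvAcounts_eq]
  have hcast : ∀ c : Int → Bool, ((((PySem.List.pyRange 0 k 1).countP c : Nat) : Int) = k) ↔
      ((PySem.List.pyRange 0 k 1).countP c = k.toNat) := by intro c; omega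
  simp only [hcast]
  rw [pvCountIff, pvCountIff]
  constructor
  · rintro (h | h)
    · left; intro i hi
      have := h i hi
      rw [pvGuardL board player x y i hsq (by omega)] at this
      simpa using this
    · right; intro i hi
      have := h i hi
      rw [pvGuardR board player x y i hsq (by omega) hy] at this
      simpa using this
  · rintro (h | h)
    · left; intro i hi
      rw [pvGuardL board player x y i hsq (by omega)]
      simpa using h i hi
    · right; intro i hi
      rw [pvGuardR board player x y i hsq (by omega) hy]
      simpa using h i hi

theorem pvAinner_iff (board : List (List String)) (player : String) (k : Int) (x : Nat)
    (cols : List String) : ∀ y : Nat,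
    pvAinner board player k x y cols = true ↔
      ∃ j, ∃ _ : j < cols.length, (cols[j] == player) = true ∧
        ((pvAcounts board player x (y + j) k).1 = k ∨ (pvAcounts board player x (y + j) k).2 = k) := by
  induction cols with
  | nil => intro y; simp [pvAinner]
  | cons col cols ih =>
    intro y
    rw [pvAinner]
    by_cases hc : (col == player) = true
    · simp only [hc, if_true]
      by_cases hhit : ((pvAcounts board player x y k).1 == k || (pvAcounts board player x y k).2 == k) = true
      · simp only [hhit, if_true]
        constructor
        · intro _
          exact ⟨0, by simp, by simpa using hc, by simpa using hhit⟩
        · intro _; trivial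
      · simp only [hhit, Bool.false_eq_true, if_false]
        rw [ih (y + 1)]
        constructor
        · rintro ⟨j, hj, h1, h2⟩
          exact ⟨j + 1, by simp at hj ⊢; omega, by simpa using h1, by
            have : y + 1 + j = y + (j + 1) := by omega
            rwa [this] at h2⟩
        · rintro ⟨j, hj, h1, h2⟩
          cases j with
          | zero =>
            exfalso; apply hhit
            simp only [Nat.add_zero] at h2
            rcases h2 with h2 | h2 <;> simp [h2]
          | succ j =>
            refine ⟨j, by simp at hj; omega, by simpa using h1, ?_⟩
            have : y + 1 + j = y + (j + 1) := by omega
            rw [this]; exact h2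
    · simp only [hc, Bool.false_eq_true, if_false]
      rw [ih (y + 1)]
      constructor
      · rintro ⟨j, hj, h1, h2⟩
        exact ⟨j + 1, by simp at hj ⊢; omega, by simpa using h1, by
          have : y + 1 + j = y + (j + 1) := by omega
          rwa [this] at h2⟩
      · rintro ⟨j, hj, h1, h2⟩
        cases j with
        | zero => exact absurd (by simpa using h1) hc
        | succ j =>
          refine ⟨j, by simp at hj; omega, by simpa using h1, ?_⟩
          have : y + 1 + j = y + (j + 1) := by omega
          rw [this]; exact h2

theorem pvAouter_iff (board : List (List String)) (player : String) (k : Int)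
    (rest : List (List String)) : ∀ x : Nat,
    pvAouter board player k x rest = some true ↔
      ∃ j, ∃ _ : j < rest.length, ((x + j : Int) + k ≤ (board.length : Int)) ∧
        pvAinner board player k (x + j) 0 rest[j] = true := by
  induction rest with
  | nil => intro x; simp [pvAouter]
  | cons row rest ih =>
    intro x
    rw [pvAouter]
    by_cases hbr : (x : Int) + k > (board.length : Int)
    · simp only [hbr, if_true]
      constructor
      · intro h; cases h
      · rintro ⟨j, hj, hle, _⟩
        exfalso; push_cast at hle; omega
    · simp only [hbr, if_false]
      by_cases hin : pvAinner board player k x 0 row = true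
      · simp only [hin, if_true]
        constructor
        · intro _
          exact ⟨0, by simp, by push_cast; omega, by simpa using hin⟩
        · intro _; trivial
      · simp only [hin, Bool.false_eq_true, if_false]
        rw [ih (x + 1)]
        constructor
        · rintro ⟨j, hj, hle, h⟩
          refine ⟨j + 1, by simp at hj ⊢; omega, by push_cast at *; omega, ?_⟩
          have : x + 1 + j = x + (j + 1) := by omega
          rwa [this] at h
        · rintro ⟨j, hj, hle, h⟩
          cases j with
          | zero => exact absurd (by simpa using h) hin
          | succ j =>
            refine ⟨j, by simp at hj; omega, by push_cast at *; omega, ?_⟩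
            have : x + 1 + j = x + (j + 1) := by omega
            rw [this]; exact h

def pvEA (board : List (List String)) (player : String) (k : Int) : Prop :=
  ∃ x y : Nat, pvP board player x y ∧ (x : Int) + k ≤ (board.length : Int) ∧
    ((∀ i < k.toNat, (y + i : Int) < (board.length : Int) ∧ pvP board player (x + i) (y + i)) ∨
     (∀ i < k.toNat, i ≤ y ∧ pvP board player (x + i) (y - i)))

theorem pvP_iff_row (board : List (List String)) (player : String) (x y : Nat)
    (hx : x < board.length) :
    pvP board player x y = true ↔ ∃ _ : y < board[x].length, (board[x][y] == player) = true := by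
  rw [pvP, List.getElem?_eq_getElem hx]
  by_cases hy : y < board[x].length
  · rw [Option.bind_some, List.getElem?_eq_getElem hy]
    simp [hy]
  · rw [Option.bind_some, List.getElem?_eq_none_iff.mpr (by omega)]
    simp [hy]

theorem pvP_x_lt (board : List (List String)) (player : String) (x y : Nat)
    (h : pvP board player x y = true) : x < board.length := by
  by_contra hx
  rw [pvP, List.getElem?_eq_none_iff.mpr (by omega)] at h
  simp at h

theorem pvP_y_lt (board : List (List String)) (player : String) (x y : Nat)
    (hsq : ∀ row ∈ board, row.length = board.length)
    (h : pvP board player x y = true) : y < board.length := by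
  have hx := pvP_x_lt board player x y h
  rw [pvP_iff_row board player x y hx] at h
  obtain ⟨hy, -⟩ := h
  have := hsq _ (List.getElem_mem hx)
  omega

theorem pvA_shape (board : List (List String)) (player : String) (k : Int) (x : Nat)
    (rest : List (List String)) :
    pvAouter board player k x rest = none ∨ pvAouter board player k x rest = some true := by
  induction rest generalizing x with
  | nil => left; rfl
  | cons row rest ih =>
    rw [pvAouter]
    split
    · left; rfl
    · split
      · right; rfl
      · exact ih (x + 1)

theorem pvA_iff (board : List (List String)) (player : String) (k : Int)
    (hsq : ∀ row ∈ board, row.length = board.length) (hk : 0 ≤ k) :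
    win_diag board player k = some true ↔ pvEA board player k := by
  rw [win_diag, pvAouter_iff]
  constructor
  · rintro ⟨j, hj, hle, hin⟩
    simp only [Nat.zero_add] at hle hin
    rw [pvAinner_iff] at hin
    obtain ⟨y, hy, heq, hhit⟩ := hin
    simp only [Nat.zero_add] at hhit
    have hyn : y < board.length := by
      have := hsq _ (List.getElem_mem hj); omega
    refine ⟨j, y, ?_, by push_cast; omega, ?_⟩
    · rw [pvP_iff_row board player j y hj]; exact ⟨hy, heq⟩
    · exact (pvHitA_iff board player j y k hsq hk (by push_cast; omega) hyn).mp hhit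
  · rintro ⟨x, y, hP, hle, hcond⟩
    have hx : x < board.length := pvP_x_lt board player x y hP
    have hyn : y < board.length := pvP_y_lt board player x y hsq hP
    obtain ⟨hy, heq⟩ := (pvP_iff_row board player x y hx).mp hP
    refine ⟨x, hx, by push_cast; omega, ?_⟩
    simp only [Nat.zero_add]
    rw [pvAinner_iff]
    exact ⟨y, hy, heq, by
      simp only [Nat.zero_add]
      exact (pvHitA_iff board player x y k hsq hk hle hyn).mpr hcond⟩

def pvRunL (board : List (List String)) (player : String) : Nat → Nat → Nat
  | 0, y => if pvP board player 0 y then 1 else 0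
  | x + 1, 0 => if pvP board player (x + 1) 0 then 1 else 0
  | x + 1, y + 1 => if pvP board player (x + 1) (y + 1) then pvRunL board player x y + 1 else 0

def pvRunR (board : List (List String)) (player : String) : Nat → Nat → Nat
  | 0, y => if pvP board player 0 y then 1 else 0
  | x + 1, y => if pvP board player (x + 1) y then pvRunR board player x (y + 1) + 1 else 0

def pvPrevL (board : List (List String)) (player : String) : Nat → List Int
  | 0 => []
  | x + 1 => (List.range board.length).map fun y => (pvRunL board player x y : Int)

def pvPrevR (board : List (List String)) (player : String) : Nat → List Int
  | 0 => []
  | x + 1 => (List.range board.length).map fun y => (pvRunR board player x y : Int)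

def pvEB (board : List (List String)) (player : String) (k : Int) : Prop :=
  ∃ x y : Nat, pvP board player x y ∧
    (k ≤ (pvRunL board player x y : Int) ∨ k ≤ (pvRunR board player x y : Int))

theorem pvRunL_of_notP (board : List (List String)) (player : String) (x y : Nat)
    (h : pvP board player x y = false) : pvRunL board player x y = 0 := by
  match x, y with
  | 0, y => rw [pvRunL, h]; rfl
  | x + 1, 0 => rw [pvRunL, h]; rfl
  | x + 1, y + 1 => rw [pvRunL, h]; rfl

theorem pvRunR_of_notP (board : List (List String)) (player : String) (x y : Nat)
    (h : pvP board player x y = false) : pvRunR board player x y = 0 := by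
  match x, y with
  | 0, y => rw [pvRunR, h]; rfl
  | x + 1, y => rw [pvRunR, h]; rfl

theorem pvGetD_prevL (board : List (List String)) (player : String) (x y : Nat)
    (hy : y < board.length) :
    (pvPrevL board player (x + 1)).getD y 0 = (pvRunL board player x y : Int) := by
  rw [pvPrevL, List.getD_eq_getElem?_getD, List.getElem?_map, List.getElem?_range hy]
  rfl

theorem pvGetD_prevR (board : List (List String)) (player : String) (x y : Nat)
    (hy : y < board.length) :
    (pvPrevR board player (x + 1)).getD y 0 = (pvRunR board player x y : Int) := by
  rw [pvPrevR, List.getD_eq_getElem?_getD, List.getElem?_map, List.getElem?_range hy]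
  rfl

theorem pvL_step (board : List (List String)) (player : String) (x y : Nat)
    (hy : y < board.length) (hP : pvP board player x y = true) :
    (pvRunL board player x y : Int)
      = 1 + (if 1 ≤ y ∧ y ≤ (pvPrevL board player x).length then (pvPrevL board player x).getD (y - 1) 0 else 0) := by
  match x, y with
  | 0, y =>
    rw [pvRunL, if_pos hP, if_neg (fun h => by simp [pvPrevL] at h; omega)]
    rfl
  | x + 1, 0 =>
    rw [pvRunL, if_pos hP, if_neg (fun h => by omega)]
    rfl
  | x + 1, y + 1 =>
    have hlen : (pvPrevL board player (x + 1)).length = board.length := by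
      simp [pvPrevL]
    rw [pvRunL, if_pos hP, if_pos (by omega)]
    have he : y + 1 - 1 = y := by omega
    rw [he, pvGetD_prevL board player x y (by omega)]
    push_cast; ring

theorem pvR_step (board : List (List String)) (player : String) (x y : Nat)
    (hsq : ∀ row ∈ board, row.length = board.length)
    (hy : y < board.length) (hP : pvP board player x y = true) :
    (pvRunR board player x y : Int)
      = 1 + (if y + 1 < (pvPrevR board player x).length then (pvPrevR board player x).getD (y + 1) 0 else 0) := by
  match x with
  | 0 =>
    rw [pvRunR, if_pos hP, if_neg (fun h => by simp [pvPrevR] at h)]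
    rfl
  | x + 1 =>
    have hlen : (pvPrevR board player (x + 1)).length = board.length := by
      simp [pvPrevR]
    rw [pvRunR, if_pos hP]
    by_cases h : y + 1 < board.length
    · rw [if_pos (by omega), pvGetD_prevR board player x (y + 1) h]
      push_cast; ring
    · rw [if_neg (by omega)]
      have hnotP : pvP board player x (y + 1) = false := by
        by_contra hc
        have := pvP_y_lt board player x (y + 1) hsq (by simpa using hc)
        omega
      rw [pvRunR_of_notP board player x (y + 1) hnotP]
      rfl

theorem pvP_of_cell (board : List (List String)) (player : String) (x y : Nat)
    (row : List String) (col : String)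
    (hrow : board[x]? = some row) (hcol : row[y]? = some col) :
    pvP board player x y = (col == player) := by
  rw [pvP, hrow, Option.bind_some, hcol]
  simp

theorem pvBrow_spec (board : List (List String)) (player : String) (k : Int) (x : Nat)
    (row : List String) (hrow : board[x]? = some row)
    (hsq : ∀ r ∈ board, r.length = board.length) :
    ∀ (cols : List String) (y : Nat) (accL accR : List Int), row.drop y = cols →
      ((pvBrow player k (pvPrevL board player x) (pvPrevR board player x) y cols accL accR = none
        ↔ ∃ j, ∃ _ : j < cols.length, pvP board player x (y + j) = true ∧
            (k ≤ (pvRunL board player x (y + j) : Int) ∨ k ≤ (pvRunR board player x (y + j) : Int)))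
      ∧ (pvBrow player k (pvPrevL board player x) (pvPrevR board player x) y cols accL accR = none ∨
         pvBrow player k (pvPrevL board player x) (pvPrevR board player x) y cols accL accR
           = some (accL.reverse ++ (List.range' y cols.length).map (fun y' => (pvRunL board player x y' : Int)),
                   accR.reverse ++ (List.range' y cols.length).map (fun y' => (pvRunR board player x y' : Int))))) := by
  have hrowlen : row.length = board.length := hsq _ (by
    exact List.mem_of_getElem? hrow)
  intro cols
  induction cols with
  | nil =>
    intro y accL accR hdrop
    refine ⟨by simp [pvBrow], Or.inr ?_⟩
    simp [pvBrow]
  | cons col cols ih =>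
    intro y accL accR hdrop
    have hcol : row[y]? = some col := by
      have h0 : (row.drop y)[0]? = some col := by rw [hdrop]; rfl
      rwa [List.getElem?_drop, Nat.add_zero] at h0
    have hylt : y < row.length := by
      by_contra hge
      rw [List.getElem?_eq_none_iff.mpr (by omega)] at hcol
      cases hcol
    have hyn : y < board.length := by omega
    have hdrop' : row.drop (y + 1) = cols := by
      have h1 : List.drop 1 (List.drop y row) = List.drop (y + 1) row := by
        rw [List.drop_drop]
      rw [← h1, hdrop]
      rfl
    have hPcell := pvP_of_cell board player x y row col hrow hcol
    by_cases hc : (col == player) = true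
    · have hP : pvP board player x y = true := by rw [hPcell]; exact hc
      have hl := pvL_step board player x y hyn hP
      have hr := pvR_step board player x y hsq hyn hP
      rw [pvBrow]
      simp only [hc, if_pos]
      rw [← hl, ← hr]
      by_cases hhit : k ≤ (pvRunL board player x y : Int) ∨ k ≤ (pvRunR board player x y : Int)
      · rw [if_pos hhit]
        exact ⟨⟨fun _ => ⟨0, by simp, by simpa using hP, by simpa using hhit⟩, fun _ => rfl⟩, Or.inl rfl⟩
      · rw [if_neg hhit]
        obtain ⟨ihiff, ihval⟩ := ih (y + 1) ((pvRunL board player x y : Int) :: accL)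
          ((pvRunR board player x y : Int) :: accR) hdrop'
        constructor
        · rw [ihiff]
          constructor
          · rintro ⟨j, hj, h1, h2⟩
            exact ⟨j + 1, by simp at hj ⊢; omega, by
              have : y + (j + 1) = y + 1 + j := by omega
              rw [this]; exact h1, by
              have : y + (j + 1) = y + 1 + j := by omega
              rw [this]; exact h2⟩
          · rintro ⟨j, hj, h1, h2⟩
            cases j with
            | zero => exact absurd (by simpa using h2) hhit
            | succ j =>
              refine ⟨j, by simp at hj; omega, ?_, ?_⟩
              · have : y + 1 + j = y + (j + 1) := by omega
                rw [this]; exact h1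
              · have : y + 1 + j = y + (j + 1) := by omega
                rw [this]; exact h2
        · rcases ihval with h | h
          · exact Or.inl h
          · refine Or.inr ?_
            rw [h]
            have hrange : List.range' y (col :: cols).length = y :: List.range' (y + 1) cols.length := by
              simp [List.range'_succ]
            rw [hrange]
            simp
    · have hP : pvP board player x y = false := by
        rw [hPcell]; simpa using hc
      rw [pvBrow]
      simp only [hc, Bool.false_eq_true, if_false]
      obtain ⟨ihiff, ihval⟩ := ih (y + 1) (0 :: accL) (0 :: accR) hdrop'
      constructor
      · rw [ihiff]
        constructor
        · rintro ⟨j, hj, h1, h2⟩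
          exact ⟨j + 1, by simp at hj ⊢; omega, by
            have : y + (j + 1) = y + 1 + j := by omega
            rw [this]; exact h1, by
            have : y + (j + 1) = y + 1 + j := by omega
            rw [this]; exact h2⟩
        · rintro ⟨j, hj, h1, h2⟩
          cases j with
          | zero => simp only [Nat.add_zero] at h1; rw [h1] at hP; cases hP
          | succ j =>
            refine ⟨j, by simp at hj; omega, ?_, ?_⟩
            · have : y + 1 + j = y + (j + 1) := by omega
              rw [this]; exact h1
            · have : y + 1 + j = y + (j + 1) := by omega
              rw [this]; exact h2
      · rcases ihval with h | h
        · exact Or.inl h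
        · refine Or.inr ?_
          rw [h]
          have hrange : List.range' y (col :: cols).length = y :: List.range' (y + 1) cols.length := by
            simp [List.range'_succ]
          rw [hrange]
          have hL0 : (pvRunL board player x y : Int) = 0 := by
            rw [pvRunL_of_notP board player x y hP]; rfl
          have hR0 : (pvRunR board player x y : Int) = 0 := by
            rw [pvRunR_of_notP board player x y hP]; rfl
          simp [hL0, hR0]

theorem pvB_shape_aux (player : String) (k : Int) (rest : List (List String)) :
    ∀ pL pR, pvBouter player k pL pR rest = none ∨ pvBouter player k pL pR rest = some true := by
  induction rest with
  | nil => intro pL pR; left; rfl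
  | cons row rest ih =>
    intro pL pR
    rw [pvBouter]
    cases h : pvBrow player k pL pR 0 row [] [] with
    | none => right; rfl
    | some p => exact ih p.1 p.2

theorem pvB_shape (board : List (List String)) (player : String) (k : Int) :
    win_diag_alt board player k = none ∨ win_diag_alt board player k = some true := by
  rw [win_diag_alt]
  exact pvB_shape_aux player k board [] []

theorem pvBouter_iff (board : List (List String)) (player : String) (k : Int)
    (hsq : ∀ r ∈ board, r.length = board.length) :
    ∀ (rest : List (List String)) (x : Nat), board.drop x = rest →
      (pvBouter player k (pvPrevL board player x) (pvPrevR board player x) rest = some true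
        ↔ ∃ j, ∃ _ : j < rest.length, ∃ y : Nat, pvP board player (x + j) y = true ∧
            (k ≤ (pvRunL board player (x + j) y : Int) ∨ k ≤ (pvRunR board player (x + j) y : Int))) := by
  intro rest
  induction rest with
  | nil => intro x hdrop; simp [pvBouter]
  | cons row rest ih =>
    intro x hdrop
    have hrow : board[x]? = some row := by
      have h0 : (board.drop x)[0]? = some row := by rw [hdrop]; rfl
      rwa [List.getElem?_drop, Nat.add_zero] at h0
    have hrowlen : row.length = board.length := hsq _ (List.mem_of_getElem? hrow)
    have hdrop' : board.drop (x + 1) = rest := by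
      have h1 : List.drop 1 (List.drop x board) = List.drop (x + 1) board := by
        rw [List.drop_drop]
      rw [← h1, hdrop]
      rfl
    obtain ⟨hiff, hval⟩ := pvBrow_spec board player k x row hrow hsq row 0 [] [] (by rfl)
    rw [pvBouter]
    cases hbr : pvBrow player k (pvPrevL board player x) (pvPrevR board player x) 0 row [] [] with
    | none =>
      simp only []
      constructor
      · intro _
        obtain ⟨j, hj, hP, hrun⟩ := hiff.mp hbr
        exact ⟨0, by simp, j, by simpa using hP, by simpa using hrun⟩
      · intro _; trivial
    | some p =>
      rcases hval with h | h
      · rw [h] at hbr; cases hbr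
      · rw [h] at hbr
        injection hbr with he
        have hp : p = (pvPrevL board player (x + 1), pvPrevR board player (x + 1)) := by
          rw [← he]
          have hr : List.range' 0 board.length = List.range board.length :=
            List.range_eq_range'.symm
          simp [hrowlen, hr, pvPrevL, pvPrevR]
        rw [hp]
        simp only []
        rw [ih (x + 1) hdrop']
        constructor
        · rintro ⟨j, hj, y, hP, hrun⟩
          refine ⟨j + 1, by simp at hj ⊢; omega, y, ?_, ?_⟩
          · have : x + (j + 1) = x + 1 + j := by omega
            rw [this]; exact hP
          · have : x + (j + 1) = x + 1 + j := by omega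
            rw [this]; exact hrun
        · rintro ⟨j, hj, y, hP, hrun⟩
          cases j with
          | zero =>
            exfalso
            have hyn : y < row.length := by
              have := pvP_y_lt board player (x + 0) y hsq hP
              omega
            have hnone : pvBrow player k (pvPrevL board player x) (pvPrevR board player x) 0 row [] [] = none := by
              rw [hiff]
              exact ⟨y, by omega, by simpa using hP, by simpa using hrun⟩
            rw [hnone] at h; cases h
          | succ j =>
            refine ⟨j, by simp at hj; omega, y, ?_, ?_⟩
            · have : x + 1 + j = x + (j + 1) := by omega
              rw [this]; exact hP
            · have : x + 1 + j = x + (j + 1) := by omega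
              rw [this]; exact hrun

theorem pvB_iff (board : List (List String)) (player : String) (k : Int)
    (hsq : ∀ row ∈ board, row.length = board.length) (hk : 0 ≤ k) :
    win_diag_alt board player k = some true ↔ pvEB board player k := by
  rw [win_diag_alt]
  have hmain := pvBouter_iff board player k hsq board 0 (by rfl)
  rw [show pvPrevL board player 0 = [] from rfl, show pvPrevR board player 0 = [] from rfl] at hmain
  rw [hmain]
  constructor
  · rintro ⟨j, hj, y, hP, hrun⟩
    exact ⟨j, y, by simpa using hP, by simpa using hrun⟩
  · rintro ⟨x, y, hP, hrun⟩
    exact ⟨x, pvP_x_lt board player x y hP, y, by simpa using hP, by simpa using hrun⟩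

theorem pvRunL_ge_iff (board : List (List String)) (player : String) :
    ∀ (x y m : Nat), m ≤ pvRunL board player x y ↔
      ∀ j < m, j ≤ x ∧ j ≤ y ∧ pvP board player (x - j) (y - j) = true := by
  intro x
  induction x with
  | zero =>
    intro y m
    rw [pvRunL]
    by_cases hP : pvP board player 0 y = true
    · rw [if_pos hP]
      constructor
      · intro hm j hj
        exact ⟨by omega, by omega, by
          have hj0 : j = 0 := by omega
          simpa [hj0] using hP⟩
      · intro h
        by_contra hm
        have := h 1 (by omega)
        omega
    · rw [if_neg hP]
      constructor
      · intro hm j hj; omega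
      · intro h
        by_contra hm
        have := (h 0 (by omega)).2.2
        simp at this
        exact hP this
  | succ x ih =>
    intro y m
    cases y with
    | zero =>
      rw [pvRunL]
      by_cases hP : pvP board player (x + 1) 0 = true
      · rw [if_pos hP]
        constructor
        · intro hm j hj
          exact ⟨by omega, by omega, by
            have hj0 : j = 0 := by omega
            simpa [hj0] using hP⟩
        · intro h
          by_contra hm
          have := (h 1 (by omega)).2.1
          omega
      · rw [if_neg hP]
        constructor
        · intro hm j hj; omega
        · intro h
          by_contra hm
          have := (h 0 (by omega)).2.2
          simp at this
          exact hP this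
    | succ y =>
      rw [pvRunL]
      by_cases hP : pvP board player (x + 1) (y + 1) = true
      · rw [if_pos hP]
        cases m with
        | zero => simp
        | succ m =>
          have : m + 1 ≤ pvRunL board player x y + 1 ↔ m ≤ pvRunL board player x y := by omega
          rw [this, ih y m]
          constructor
          · intro h j hj
            cases j with
            | zero => exact ⟨by omega, by omega, by simpa using hP⟩
            | succ j =>
              obtain ⟨h1, h2, h3⟩ := h j (by omega)
              exact ⟨by omega, by omega, by
                have e1 : x + 1 - (j + 1) = x - j := by omega
                have e2 : y + 1 - (j + 1) = y - j := by omega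
                rw [e1, e2]; exact h3⟩
          · intro h j hj
            obtain ⟨h1, h2, h3⟩ := h (j + 1) (by omega)
            exact ⟨by omega, by omega, by
              have e1 : x + 1 - (j + 1) = x - j := by omega
              have e2 : y + 1 - (j + 1) = y - j := by omega
              rw [e1, e2] at h3; exact h3⟩
      · rw [if_neg hP]
        constructor
        · intro hm j hj; omega
        · intro h
          by_contra hm
          have := (h 0 (by omega)).2.2
          simp at this
          exact hP this

theorem pvRunR_ge_iff (board : List (List String)) (player : String) :
    ∀ (x y m : Nat), m ≤ pvRunR board player x y ↔
      ∀ j < m, j ≤ x ∧ pvP board player (x - j) (y + j) = true := by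
  intro x
  induction x with
  | zero =>
    intro y m
    rw [pvRunR]
    by_cases hP : pvP board player 0 y = true
    · rw [if_pos hP]
      constructor
      · intro hm j hj
        have hj0 : j = 0 := by omega
        exact ⟨by omega, by simpa [hj0] using hP⟩
      · intro h
        by_contra hm
        have := (h 1 (by omega)).1
        omega
    · rw [if_neg hP]
      constructor
      · intro hm j hj; omega
      · intro h
        by_contra hm
        have := (h 0 (by omega)).2
        simp at this
        exact hP this
  | succ x ih =>
    intro y m
    rw [pvRunR]
    by_cases hP : pvP board player (x + 1) y = true
    · rw [if_pos hP]
      cases m with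
      | zero => simp
      | succ m =>
        have : m + 1 ≤ pvRunR board player x (y + 1) + 1 ↔ m ≤ pvRunR board player x (y + 1) := by omega
        rw [this, ih (y + 1) m]
        constructor
        · intro h j hj
          cases j with
          | zero => exact ⟨by omega, by simpa using hP⟩
          | succ j =>
            obtain ⟨h1, h3⟩ := h j (by omega)
            exact ⟨by omega, by
              have e1 : x + 1 - (j + 1) = x - j := by omega
              have e2 : y + (j + 1) = y + 1 + j := by omega
              rw [e1, e2]; exact h3⟩
        · intro h j hj
          obtain ⟨h1, h3⟩ := h (j + 1) (by omega)
          exact ⟨by omega, by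
            have e1 : x + 1 - (j + 1) = x - j := by omega
            have e2 : y + (j + 1) = y + 1 + j := by omega
            rw [e1, e2] at h3; exact h3⟩
    · rw [if_neg hP]
      constructor
      · intro hm j hj; omega
      · intro h
        by_contra hm
        have := (h 0 (by omega)).2
        simp at this
        exact hP this

theorem pvEA_iff_EB (board : List (List String)) (player : String) (k : Int)
    (hsq : ∀ row ∈ board, row.length = board.length) (hk : 0 ≤ k) :
    pvEA board player k ↔ pvEB board player k := by
  constructor
  · rintro ⟨x, y, hP, hle, hcl | hcr⟩
    · by_cases h0 : k.toNat = 0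
      · exact ⟨x, y, hP, Or.inl (by omega)⟩
      · refine ⟨x + (k.toNat - 1), y + (k.toNat - 1), ?_, Or.inl ?_⟩
        · exact (hcl (k.toNat - 1) (by omega)).2
        · have hrun : k.toNat ≤ pvRunL board player (x + (k.toNat - 1)) (y + (k.toNat - 1)) := by
            rw [pvRunL_ge_iff]
            intro j hj
            refine ⟨by omega, by omega, ?_⟩
            have e1 : x + (k.toNat - 1) - j = x + (k.toNat - 1 - j) := by omega
            have e2 : y + (k.toNat - 1) - j = y + (k.toNat - 1 - j) := by omega
            rw [e1, e2]
            exact (hcl (k.toNat - 1 - j) (by omega)).2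
          omega
    · by_cases h0 : k.toNat = 0
      · exact ⟨x, y, hP, Or.inl (by omega)⟩
      · have hky : k.toNat - 1 ≤ y := (hcr (k.toNat - 1) (by omega)).1
        refine ⟨x + (k.toNat - 1), y - (k.toNat - 1), ?_, Or.inr ?_⟩
        · exact (hcr (k.toNat - 1) (by omega)).2
        · have hrun : k.toNat ≤ pvRunR board player (x + (k.toNat - 1)) (y - (k.toNat - 1)) := by
            rw [pvRunR_ge_iff]
            intro j hj
            refine ⟨by omega, ?_⟩
            have e1 : x + (k.toNat - 1) - j = x + (k.toNat - 1 - j) := by omega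
            have e2 : y - (k.toNat - 1) + j = y - (k.toNat - 1 - j) := by omega
            rw [e1, e2]
            exact (hcr (k.toNat - 1 - j) (by omega)).2
          omega
  · rintro ⟨x, y, hP, hr | hr⟩
    · have h := (pvRunL_ge_iff board player x y k.toNat).mp (by omega)
      have hxn : x < board.length := pvP_x_lt board player x y hP
      by_cases h0 : k.toNat = 0
      · exact ⟨x, y, hP, by push_cast; omega, Or.inl (by omega)⟩
      · obtain ⟨hjx, hjy, hPs⟩ := h (k.toNat - 1) (by omega)
        refine ⟨x - (k.toNat - 1), y - (k.toNat - 1), hPs, by push_cast; omega, Or.inl ?_⟩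
        intro i hi
        obtain ⟨-, -, hPi⟩ := h (k.toNat - 1 - i) (by omega)
        have e1 : x - (k.toNat - 1 - i) = x - (k.toNat - 1) + i := by omega
        have e2 : y - (k.toNat - 1 - i) = y - (k.toNat - 1) + i := by omega
        rw [e1, e2] at hPi
        refine ⟨?_, hPi⟩
        have := pvP_y_lt board player (x - (k.toNat - 1) + i) (y - (k.toNat - 1) + i) hsq hPi
        push_cast
        omega
    · have h := (pvRunR_ge_iff board player x y k.toNat).mp (by omega)
      have hxn : x < board.length := pvP_x_lt board player x y hP
      by_cases h0 : k.toNat = 0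
      · exact ⟨x, y, hP, by push_cast; omega, Or.inl (by omega)⟩
      · obtain ⟨hjx, hPs⟩ := h (k.toNat - 1) (by omega)
        refine ⟨x - (k.toNat - 1), y + (k.toNat - 1), hPs, by push_cast; omega, Or.inr ?_⟩
        intro i hi
        obtain ⟨-, hPi⟩ := h (k.toNat - 1 - i) (by omega)
        have e1 : x - (k.toNat - 1 - i) = x - (k.toNat - 1) + i := by omega
        have e2 : y + (k.toNat - 1 - i) = y + (k.toNat - 1) - i := by omega
        rw [e1, e2] at hPi
        exact ⟨by omega, hPi⟩

-- ===== the degenerate regimes: k ≤ 0 and k > board height =====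

theorem pvAcounts_le0 (board : List (List String)) (player : String) (x y : Nat) (k : Int)
    (hk : k ≤ 0) : pvAcounts board player x y k = (0, 0) := by
  rw [pvAcounts, PySem.List.pyRange_one_eq_nil (by omega)]
  rfl

theorem pvAinner_neg (board : List (List String)) (player : String) (k : Int) (x : Nat)
    (hk : k < 0) : ∀ (cols : List String) (y : Nat),
    pvAinner board player k x y cols = false := by
  intro cols
  induction cols with
  | nil => intro y; rfl
  | cons col cols ih =>
    intro y
    rw [pvAinner]
    by_cases hc : (col == player) = true
    · simp only [hc, if_true]
      rw [pvAcounts_le0 board player x y k (by omega)]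
      have h1 : ((0 : Int) == k) = false := by simp; omega
      simp only [h1, Bool.or_self, Bool.false_eq_true, if_false]
      exact ih (y + 1)
    · simp only [hc, Bool.false_eq_true, if_false]
      exact ih (y + 1)

theorem pvAinner_zero (board : List (List String)) (player : String) (x : Nat) :
    ∀ (cols : List String) (y : Nat),
    pvAinner board player 0 x y cols = true ↔ ∃ col ∈ cols, (col == player) = true := by
  intro cols
  induction cols with
  | nil => intro y; simp [pvAinner]
  | cons col cols ih =>
    intro y
    rw [pvAinner]
    by_cases hc : (col == player) = true
    · simp only [hc, if_true]
      rw [pvAcounts_le0 board player x y 0 (by omega)]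
      simp only [show (((0,0) : Int × Int).1 == (0:Int) || ((0,0) : Int × Int).2 == (0:Int)) = true from by decide, if_true]
      exact ⟨fun _ => ⟨col, List.mem_cons_self, hc⟩, fun _ => trivial⟩
    · simp only [hc, Bool.false_eq_true, if_false]
      rw [ih (y + 1)]
      simp only [List.mem_cons]
      constructor
      · rintro ⟨c, hm, he⟩; exact ⟨c, Or.inr hm, he⟩
      · rintro ⟨c, hm | hm, he⟩
        · rw [hm] at he; exact absurd he hc
        · exact ⟨c, hm, he⟩

theorem pvA_neg (board : List (List String)) (player : String) (k : Int) (hk : k < 0) :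
    win_diag board player k = none := by
  rw [win_diag]
  have : ∀ (rest : List (List String)) (x : Nat), pvAouter board player k x rest = none := by
    intro rest
    induction rest with
    | nil => intro x; rfl
    | cons row rest ih =>
      intro x
      rw [pvAouter]
      split
      · rfl
      · rw [pvAinner_neg board player k x hk row 0]
        simp only [Bool.false_eq_true, if_false]
        exact ih (x + 1)
  exact this board 0

theorem pvA_zero (board : List (List String)) (player : String) :
    win_diag board player 0 = some true ↔
      ∃ row ∈ board, ∃ col ∈ row, (col == player) = true := by
  rw [win_diag]
  have main : ∀ (rest : List (List String)) (x : Nat), x + rest.length ≤ board.length →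
      (pvAouter board player 0 x rest = some true ↔
        ∃ row ∈ rest, ∃ col ∈ row, (col == player) = true) := by
    intro rest
    induction rest with
    | nil => intro x _; simp [pvAouter]
    | cons row rest ih =>
      intro x hx
      rw [pvAouter]
      rw [if_neg (by
        simp only [List.length_cons] at hx
        push_cast
        omega)]
      by_cases hin : pvAinner board player 0 x 0 row = true
      · simp only [hin, if_true]
        rw [pvAinner_zero board player x row 0] at hin
        simp only [List.mem_cons]
        constructor
        · intro _; exact ⟨row, Or.inl rfl, hin⟩
        · intro _; trivial
      · simp only [hin, Bool.false_eq_true, if_false]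
        rw [ih (x + 1) (by simp only [List.length_cons] at hx; omega)]
        simp only [List.mem_cons]
        constructor
        · rintro ⟨r, hm, hc⟩; exact ⟨r, Or.inr hm, hc⟩
        · rintro ⟨r, hm | hm, hc⟩
          · rw [pvAinner_zero board player x row 0] at hin
            rw [hm] at hc
            exact absurd hc hin
          · exact ⟨r, hm, hc⟩
  exact main board 0 (by omega)

theorem pvA_big (board : List (List String)) (player : String) (k : Int)
    (hk : (board.length : Int) < k) : win_diag board player k = none := by
  rw [win_diag]
  cases board with
  | nil => rfl
  | cons row rest =>
    rw [pvAouter, if_pos (by push_cast at *; omega)]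

theorem pvGetD_nonneg (pL : List Int) (i : Nat) (h : ∀ v ∈ pL, 0 ≤ v) :
    0 ≤ pL.getD i 0 := by
  rw [List.getD_eq_getElem?_getD]
  cases hg : pL[i]? with
  | none => simp
  | some v =>
    have := h v (List.mem_of_getElem? hg)
    simpa using this

theorem pvGetD_bound (pL : List Int) (i : Nat) (m : Int) (hm : 0 ≤ m)
    (h : ∀ v ∈ pL, 0 ≤ v ∧ v ≤ m) : 0 ≤ pL.getD i 0 ∧ pL.getD i 0 ≤ m := by
  rw [List.getD_eq_getElem?_getD]
  cases hg : pL[i]? with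
  | none => simpa using hm
  | some v =>
    have := h v (List.mem_of_getElem? hg)
    simpa using this

theorem pvBrow_le0 (player : String) (k : Int) (pL pR : List Int)
    (hk : k ≤ 0) (hpL : ∀ v ∈ pL, 0 ≤ v) :
    ∀ (cols : List String) (y : Nat) (accL accR : List Int),
      (pvBrow player k pL pR y cols accL accR = none ↔ ∃ col ∈ cols, (col == player) = true)
      ∧ (pvBrow player k pL pR y cols accL accR = none ∨
         pvBrow player k pL pR y cols accL accR
           = some (accL.reverse ++ List.replicate cols.length 0,
                   accR.reverse ++ List.replicate cols.length 0)) := by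
  intro cols
  induction cols with
  | nil =>
    intro y accL accR
    refine ⟨by simp [pvBrow], Or.inr (by simp [pvBrow])⟩
  | cons col cols ih =>
    intro y accL accR
    rw [pvBrow]
    by_cases hc : (col == player) = true
    · simp only [hc, if_true]
      rw [if_pos (by
        left
        have h1 : 0 ≤ (if 1 ≤ y ∧ y ≤ pL.length then pL.getD (y - 1) 0 else 0) := by
          split
          · exact pvGetD_nonneg pL (y - 1) hpL
          · omega
        omega)]
      exact ⟨⟨fun _ => ⟨col, by simp, hc⟩, fun _ => rfl⟩, Or.inl rfl⟩
    · simp only [hc, Bool.false_eq_true, if_false]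
      obtain ⟨ihiff, ihval⟩ := ih (y + 1) (0 :: accL) (0 :: accR)
      constructor
      · rw [ihiff]
        simp only [List.mem_cons]
        constructor
        · rintro ⟨c, hm, he⟩; exact ⟨c, Or.inr hm, he⟩
        · rintro ⟨c, hm | hm, he⟩
          · rw [hm] at he; exact absurd he hc
          · exact ⟨c, hm, he⟩
      · rcases ihval with h | h
        · exact Or.inl h
        · refine Or.inr ?_
          rw [h]
          simp [List.replicate_succ]

theorem pvBouter_le0 (player : String) (k : Int) (hk : k ≤ 0) :
    ∀ (rest : List (List String)) (pL pR : List Int), (∀ v ∈ pL, 0 ≤ v) →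
      (pvBouter player k pL pR rest = some true ↔
        ∃ row ∈ rest, ∃ col ∈ row, (col == player) = true) := by
  intro rest
  induction rest with
  | nil => intro pL pR _; simp [pvBouter]
  | cons row rest ih =>
    intro pL pR hpL
    obtain ⟨hiff, hval⟩ := pvBrow_le0 player k pL pR hk hpL row 0 [] []
    rw [pvBouter]
    cases hbr : pvBrow player k pL pR 0 row [] [] with
    | none =>
      simp only [List.mem_cons]
      constructor
      · intro _
        obtain ⟨c, hm, he⟩ := hiff.mp hbr
        exact ⟨row, Or.inl rfl, c, hm, he⟩
      · intro _; trivial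
    | some p =>
      rcases hval with h | h
      · rw [h] at hbr; cases hbr
      · rw [h] at hbr
        injection hbr with he
        have hp1 : p.1 = List.replicate row.length 0 := by rw [← he]; simp
        have hnoin : ¬ ∃ col ∈ row, (col == player) = true := by
          intro hex
          have := hiff.mpr hex
          rw [this] at h; cases h
        simp only []
        rw [ih p.1 p.2 (by
          rw [hp1]
          intro v hv
          have := List.eq_of_mem_replicate hv
          omega)]
        simp only [List.mem_cons]
        constructor
        · rintro ⟨r, hm, hc⟩; exact ⟨r, Or.inr hm, hc⟩
        · rintro ⟨r, hm | hm, hc⟩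
          · rw [hm] at hc; exact absurd hc hnoin
          · exact ⟨r, hm, hc⟩

theorem pvB_le0_iff (board : List (List String)) (player : String) (k : Int) (hk : k ≤ 0) :
    win_diag_alt board player k = some true ↔
      ∃ row ∈ board, ∃ col ∈ row, (col == player) = true := by
  rw [win_diag_alt]
  exact pvBouter_le0 player k hk board [] [] (by simp)

theorem pvBrow_bound (player : String) (k : Int) (pL pR : List Int) (m : Int)
    (hm : 0 ≤ m) (hk : m + 1 < k)
    (hpL : ∀ v ∈ pL, 0 ≤ v ∧ v ≤ m) (hpR : ∀ v ∈ pR, 0 ≤ v ∧ v ≤ m) :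
    ∀ (cols : List String) (y : Nat) (accL accR : List Int),
      (∀ v ∈ accL, 0 ≤ v ∧ v ≤ m + 1) → (∀ v ∈ accR, 0 ≤ v ∧ v ≤ m + 1) →
      ∃ dl dr, pvBrow player k pL pR y cols accL accR = some (dl, dr) ∧
        (∀ v ∈ dl, 0 ≤ v ∧ v ≤ m + 1) ∧ (∀ v ∈ dr, 0 ≤ v ∧ v ≤ m + 1) := by
  intro cols
  induction cols with
  | nil =>
    intro y accL accR haL haR
    refine ⟨accL.reverse, accR.reverse, rfl, ?_, ?_⟩
    · intro v hv; exact haL v (List.mem_reverse.mp hv)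
    · intro v hv; exact haR v (List.mem_reverse.mp hv)
  | cons col cols ih =>
    intro y accL accR haL haR
    rw [pvBrow]
    by_cases hc : (col == player) = true
    · simp only [hc, if_true]
      have hl : 0 ≤ (if 1 ≤ y ∧ y ≤ pL.length then pL.getD (y - 1) 0 else 0) ∧
          (if 1 ≤ y ∧ y ≤ pL.length then pL.getD (y - 1) 0 else 0) ≤ m := by
        split
        · exact pvGetD_bound pL (y - 1) m hm hpL
        · omega
      have hr : 0 ≤ (if y + 1 < pR.length then pR.getD (y + 1) 0 else 0) ∧
          (if y + 1 < pR.length then pR.getD (y + 1) 0 else 0) ≤ m := by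
        split
        · exact pvGetD_bound pR (y + 1) m hm hpR
        · omega
      rw [if_neg (by omega)]
      exact ih (y + 1) (_ :: accL) (_ :: accR)
        (by
          intro v hv
          rcases List.mem_cons.mp hv with hv | hv
          · subst hv; omega
          · exact haL v hv)
        (by
          intro v hv
          rcases List.mem_cons.mp hv with hv | hv
          · subst hv; omega
          · exact haR v hv)
    · simp only [hc, Bool.false_eq_true, if_false]
      exact ih (y + 1) (0 :: accL) (0 :: accR)
        (by
          intro v hv
          rcases List.mem_cons.mp hv with hv | hv
          · subst hv; constructor <;> omega
          · exact haL v hv)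
        (by
          intro v hv
          rcases List.mem_cons.mp hv with hv | hv
          · subst hv; constructor <;> omega
          · exact haR v hv)

theorem pvBouter_big (player : String) (k : Int) (N : Int) (hNk : N < k) :
    ∀ (rest : List (List String)) (m : Int) (pL pR : List Int),
      0 ≤ m → m + rest.length ≤ N →
      (∀ v ∈ pL, 0 ≤ v ∧ v ≤ m) → (∀ v ∈ pR, 0 ≤ v ∧ v ≤ m) →
      pvBouter player k pL pR rest = none := by
  intro rest
  induction rest with
  | nil => intro m pL pR _ _ _ _; rfl
  | cons row rest ih =>
    intro m pL pR hm hbound hpL hpR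
    simp only [List.length_cons] at hbound
    obtain ⟨dl, dr, hbr, hdl, hdr⟩ :=
      pvBrow_bound player k pL pR m hm (by push_cast at hbound ⊢; omega) hpL hpR row 0 [] []
        (by simp) (by simp)
    rw [pvBouter, hbr]
    exact ih (m + 1) dl dr (by omega) (by push_cast at hbound ⊢; omega) hdl hdr

theorem pvB_big (board : List (List String)) (player : String) (k : Int)
    (hk : (board.length : Int) < k) : win_diag_alt board player k = none := by
  rw [win_diag_alt]
  exact pvBouter_big player k board.length hk board 0 [] [] (by omega)
    (by push_cast; omega) (by simp) (by simp)
theorem pvEqOfIff (board : List (List String)) (player : String) (k : Int)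
    (hiff : win_diag board player k = some true ↔ win_diag_alt board player k = some true) :
    win_diag board player k = win_diag_alt board player k := by
  rcases pvA_shape board player k 0 board with h | h <;>
    rcases pvB_shape board player k with h' | h' <;>
    have hA : win_diag board player k = pvAouter board player k 0 board := rfl
  · rw [hA, h, h']
  · have := hiff.mpr h'; rw [hA, h] at this; cases this
  · have := hiff.mp (by rw [hA, h]); rw [h'] at this; cases this
  · rw [hA, h, h']

-- ===== VERDICT (by name: the statements are the Claim_ definitions above) =====
theorem win_diag_spec : Claim_unchanged_win_diag := by
  intro board player k _ hpre
  unfold Spec_win_diag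
  intro hD
  by_cases hneg : k < 0
  · rw [pvA_neg board player k hneg]
    rcases pvB_shape board player k with h' | h'
    · rw [h']
    · exfalso
      obtain ⟨row, hm, col, hcm, hce⟩ := (pvB_le0_iff board player k (by omega)).mp h'
      refine hD ⟨hneg, row, hm, ?_⟩
      have hcol : col = player := by simpa using hce
      rw [← hcol]; exact hcm
  · by_cases h0 : k = 0
    · subst h0
      exact pvEqOfIff board player 0
        ((pvA_zero board player).trans (pvB_le0_iff board player 0 (by omega)).symm)
    · unfold Pre_win_diag at hpre
      rcases hpre with h | h | h
      · omega
      · rw [pvA_big board player k h, pvB_big board player k h]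
      · exact pvEqOfIff board player k
          ((pvA_iff board player k h (by omega)).trans
            ((pvEA_iff_EB board player k h (by omega)).trans
              (pvB_iff board player k h (by omega)).symm))

theorem win_diag_changed : Claim_changed_win_diag := by
  unfold Claim_changed_win_diag
  refine ⟨by decide, by decide, by decide, by decide, by decide, by decide⟩

theorem win_diag_tight : Claim_exact_win_diag := by
  intro board player k _ _ hD
  obtain ⟨hneg, row, hm, hpm⟩ := hD
  rw [pvA_neg board player k hneg,
      (pvB_le0_iff board player k (by omega)).mpr ⟨row, hm, player, hpm, by simp⟩]
  simp
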